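-- pv_equiv track=rewrite | github.com/gramolin/ponderthis | 2022-01/main.py | reorder_circle
-- ===== SOURCE A (Python) =====
-- def reorder_circle(circle):
--     """Reorder the circle elements so that it starts from the lowest element
--         and goes to the direction of the smallest of two possible second elements.
--         For example, the circle "4736201" becomes "0147362". The circle
--         "32187654" becomes "12345678"."""
--     length = len(circle)
--     assert length == len(set(circle)), "Not all elements of the circle are unique!"
--     digits = [int(i) for i in list(circle)]
--     new_circle = str(min(digits))
--     start_index = circle.find(new_circle)
--     neighbors = [circle[start_index-1], circle[(start_index+1) % length]]
--     if int(neighbors[0]) > int(neighbors[1]):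
--         new_circle += circle[start_index+1:]
--         new_circle += circle[:start_index]
--     else:
--         new_circle += circle[:start_index][::-1] # Reverse direction
--         new_circle += circle[start_index+1:][::-1] # Reverse direction
--     assert len(new_circle) == len(circle), "Wrong length of the new circle!"
--     assert set(new_circle) == set(circle), "Wrong elements in the new circle!"
--     return new_circle
-- ===== SOURCE B (Python) =====
-- def reorder_circle(circle):
--     """Canonical form of the digit circle: the lexicographically smallest
--     of all rotations of the digit sequence and of its reversal."""
--     n = len(circle)
--     assert n == len(set(circle)), "Not all elements of the circle are unique!"
--     digits = [int(ch) for ch in circle]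
--     doubled = digits + digits
--     rev = digits[::-1]
--     drev = rev + rev
--     candidates = [doubled[i:i+n] for i in range(n)] + [drev[i:i+n] for i in range(n)]
--     best = min(candidates)
--     return ''.join(str(d) for d in best)
-- ===== Notes on version B (the rewrite author's own statement) =====
-- stated objective: alternative
-- what changed: A locates the minimum digit and decides the travel direction by comparing its two neighbors, then builds one string from slices; B never searches for the minimum or compares neighbors: it enumerates all n rotations of the circle and all n rotations of the reversed circle (windows of the doubled strings) and returns the lexicographically smallest candidate.
import Mathlib
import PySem

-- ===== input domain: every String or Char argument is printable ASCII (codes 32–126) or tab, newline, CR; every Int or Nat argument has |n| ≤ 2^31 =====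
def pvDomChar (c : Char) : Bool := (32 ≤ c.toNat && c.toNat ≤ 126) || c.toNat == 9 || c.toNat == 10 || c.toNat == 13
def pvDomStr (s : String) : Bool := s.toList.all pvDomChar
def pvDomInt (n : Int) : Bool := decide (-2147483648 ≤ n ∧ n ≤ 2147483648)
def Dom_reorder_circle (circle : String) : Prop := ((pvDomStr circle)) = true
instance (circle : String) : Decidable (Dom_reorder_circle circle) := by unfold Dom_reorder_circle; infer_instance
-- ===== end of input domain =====

-- B replaces A's find-the-minimum-and-compare-neighbors construction by enumerating all
-- rotations of the circle and of the reversed circle and taking the lexicographic minimum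
-- (a genuinely different, brute-force canonicalization; same result on unique digit circles).

-- ===== PORT A =====
-- A-side helper: int(c) for a one-character string (ValueError → default 0, excluded by Pre_)
def pvCharInt (c : Char) : Int := (PySem.Int.ofChars? [c]).getD 0

def reorder_circle (circle : String) : String :=
  let cs := circle.toList
  let length : Int := PySem.Str.len circle
  -- assert length == len(set(circle)): AssertionError outside Pre_ (chars must be unique)
  let digits : List Int := cs.map (fun i => pvCharInt i)  -- int(i): ValueError outside Pre_
  let newCircle : List Char := PySem.Int.toChars ((PySem.List.min? digits (fun x => x)).getD 0)  -- str(min(digits)); min([]) raises outside Pre_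
  let startIndex : Int := PySem.Chars.find cs newCircle  -- circle.find(new_circle): PySem.Str.find is exactly this on toList
  let neighbors : List Char := [PySem.List.pyGetD cs (startIndex - 1) ' ',
                                PySem.List.pyGetD cs (PySem.Int.mod (startIndex + 1) length) ' ']
  if pvCharInt (PySem.List.pyGetD neighbors 0 ' ') > pvCharInt (PySem.List.pyGetD neighbors 1 ' ') then
    String.ofList (newCircle ++ PySem.List.slice cs (some (startIndex + 1)) none
                             ++ PySem.List.slice cs none (some startIndex))
  else  -- reverse direction: xs[::-1] is List.reverse (PySem.List.slice?_none_none_neg_one)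
    String.ofList (newCircle ++ (PySem.List.slice cs none (some startIndex)).reverse
                             ++ (PySem.List.slice cs (some (startIndex + 1)) none).reverse)

-- ===== PORT B =====
def reorder_circle_alt (circle : String) : String :=
  let cs := circle.toList
  let n : Int := PySem.Str.len circle
  -- assert n == len(set(circle)): AssertionError outside Pre_ (chars must be unique)
  let digits : List Int := cs.map (fun ch => pvCharInt ch)  -- int(ch): ValueError outside Pre_
  let doubled : List Int := digits ++ digits
  let rev : List Int := digits.reverse                      -- digits[::-1] (PySem.List.slice?_none_none_neg_one)
  let drev : List Int := rev ++ rev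
  let candidates : List (List Int) :=
    (PySem.List.pyRange 0 n 1).map (fun i => PySem.List.slice doubled (some i) (some (i + n)))
    ++ (PySem.List.pyRange 0 n 1).map (fun i => PySem.List.slice drev (some i) (some (i + n)))
  -- min(candidates): Python lexicographic min over int lists; min([]) raises outside Pre_
  let best : List Int := (PySem.List.min? candidates (fun x => x)).getD []
  -- ''.join(str(d) for d in best): concatenate str(d) (= PySem.Int.toChars d) for each d
  String.ofList ((best.map (fun d => PySem.Int.toChars d)).flatten)

-- ===== PRECONDITION & SPEC =====
def pvDigitChars : List Char := ['0', '1', '2', '3', '4', '5', '6', '7', '8', '9']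

-- Pre_: A raises outside this set — AssertionError on duplicate characters, ValueError (int) on any
-- non-digit character, ValueError (min of empty sequence) on the empty string.
def Pre_reorder_circle (circle : String) : Prop :=
  circle.toList ≠ [] ∧ PySem.Set.ofList circle.toList = circle.toList ∧
    (circle.toList.all (fun c => pvDigitChars.contains c)) = true
instance (circle : String) : Decidable (Pre_reorder_circle circle) := by
  unfold Pre_reorder_circle; infer_instance

def pvWitness_reorder_circle : String := "4736201"

def Spec_reorder_circle (circle : String) (out : String) : Prop := out = reorder_circle_alt circle
instance (circle : String) (out : String) : Decidable (Spec_reorder_circle circle out) := by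
  unfold Spec_reorder_circle; infer_instance

-- ===== CLAIM (what is proved, stated in full; the proofs are below) =====
def Claim_equal_reorder_circle : Prop := ∀ (circle : String), Dom_reorder_circle circle → Pre_reorder_circle circle → Spec_reorder_circle circle (reorder_circle circle)

-- ===== LEMMAS AND PROOFS =====

-- lexicographic strict order on lists: a common prefix then a smaller head decides
theorem pv_lex_append_cons {P f r : List Char} {c1 c2 : Char} (h : c1 < c2) :
    P ++ c1 :: f < P ++ c2 :: r := by
  refine (List.lt_iff_lex_lt _ _).mpr ?_
  induction P with
  | nil => exact List.Lex.rel h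
  | cons a t ih => exact List.Lex.cons ih

-- find.go on a single-character needle returns an in-range index of an occurrence
theorem pv_find_go_mem (c : Char) : ∀ (s : List Char) (k : Nat), c ∈ s →
    ∃ j : Nat, ∃ hj : j < s.length, s[j] = c ∧ PySem.Chars.find.go [c] s k = ((k + j : Nat) : Int) := by
  intro s
  induction s with
  | nil => intro k h; simp at h
  | cons a t ih =>
    intro k h
    by_cases hca : c = a
    · refine ⟨0, by simp, by simp [hca], ?_⟩
      subst hca; simp [PySem.Chars.find.go, List.isPrefixOf]
    · have hct : c ∈ t := by
        rcases List.mem_cons.mp h with h1 | h1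
        · exact absurd h1 hca
        · exact h1
      obtain ⟨j, hj, hjc, hgo⟩ := ih (k + 1) hct
      refine ⟨j + 1, by simpa using hj, by simpa using hjc, ?_⟩
      have heq : PySem.Chars.find.go [c] (a :: t) k = PySem.Chars.find.go [c] t (k + 1) := by
        simp [PySem.Chars.find.go, List.isPrefixOf, beq_iff_eq, hca]
      rw [heq, hgo]; push_cast; ring

theorem pv_find_mem {cs : List Char} {c : Char} (h : c ∈ cs) :
    ∃ j : Nat, ∃ hj : j < cs.length, cs[j] = c ∧ PySem.Chars.find cs [c] = (j : Int) := by
  obtain ⟨j, hj, hjc, hgo⟩ := pv_find_go_mem c cs 0 h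
  exact ⟨j, hj, hjc, by simpa [PySem.Chars.find] using hgo⟩

-- the minimum digit, rendered back with str(), is one character of the input, minimal by int value
theorem pv_min_toChars {cs : List Char} (hne : cs ≠ []) (hdig : ∀ c ∈ cs, c ∈ pvDigitChars) :
    ∃ c ∈ cs, PySem.Int.toChars ((PySem.List.min? (cs.map (fun i => pvCharInt i)) (fun x => x)).getD 0) = [c]
      ∧ ∀ d ∈ cs, pvCharInt c ≤ pvCharInt d := by
  have hdne : cs.map (fun i => pvCharInt i) ≠ [] := by simpa using hne
  obtain ⟨v, hv⟩ : ∃ v, PySem.List.min? (cs.map (fun i => pvCharInt i)) (fun x => x) = some v := by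
    rcases h : PySem.List.min? (cs.map (fun i => pvCharInt i)) (fun x => x) with _ | v
    · exact absurd ((PySem.List.min?_eq_none_iff _ _).mp h) hdne
    · exact ⟨v, rfl⟩
  have hvm : v ∈ cs.map (fun i => pvCharInt i) := PySem.List.min?_mem hv
  have hvmin := PySem.List.min?_isMin hv
  obtain ⟨c, hc, hcv⟩ := List.mem_map.mp hvm
  refine ⟨c, hc, ?_, ?_⟩
  · rw [hv, Option.getD_some, ← hcv]
    have hcd := hdig c hc
    fin_cases hcd <;> decide
  · intro d hd
    rw [hcv]
    exact hvmin _ (List.mem_map.mpr ⟨d, hd, rfl⟩)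

-- digit-char comparison agrees with comparison of the int() values
theorem pv_digit_gt_iff : ∀ a ∈ pvDigitChars, ∀ b ∈ pvDigitChars,
    (pvCharInt a > pvCharInt b ↔ b < a) := by
  intro a ha b hb
  fin_cases ha <;> fin_cases hb <;> decide

-- the window of length n at offset i in the doubled list is the rotation at i
theorem pv_rotation {α : Type} (xs : List α) (i : Nat) (hi : i ≤ xs.length) :
    PySem.List.slice (xs ++ xs) (some (i : Int)) (some ((i : Int) + (xs.length : Int)))
      = xs.drop i ++ xs.take i := by
  rw [show ((xs.length : Nat) : Int) = ((xs.length : Nat) : Int) from rfl,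
      PySem.List.slice_natCast_add (xs ++ xs) i xs.length]
  rw [List.drop_append_of_le_length hi, List.take_append]
  have h1 : (xs.drop i).take xs.length = xs.drop i :=
    List.take_of_length_le (by simp)
  rw [h1]
  congr 1
  congr 1
  simp
  omega

-- A's branch equals the smaller of the forward and backward candidates (common prefix m, in-range start)
theorem pv_core (cs mchars : List Char) (s : Nat) (hs : s < cs.length) (hnd : cs.Nodup)
    (hdig : ∀ c ∈ cs, c ∈ pvDigitChars) :
    (if pvCharInt (PySem.List.pyGetD cs ((s : Int) - 1) ' ') >
        pvCharInt (PySem.List.pyGetD cs (PySem.Int.mod ((s : Int) + 1) (cs.length : Int)) ' ') then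
       mchars ++ PySem.List.slice cs (some ((s : Int) + 1)) none ++ PySem.List.slice cs none (some (s : Int))
     else
       mchars ++ (PySem.List.slice cs none (some (s : Int))).reverse
              ++ (PySem.List.slice cs (some ((s : Int) + 1)) none).reverse)
    = (if (mchars ++ (PySem.List.slice cs none (some (s : Int))).reverse
                  ++ (PySem.List.slice cs (some ((s : Int) + 1)) none).reverse)
         < (mchars ++ PySem.List.slice cs (some ((s : Int) + 1)) none ++ PySem.List.slice cs none (some (s : Int)))
       then mchars ++ (PySem.List.slice cs none (some (s : Int))).reverse
                   ++ (PySem.List.slice cs (some ((s : Int) + 1)) none).reverse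
       else mchars ++ PySem.List.slice cs (some ((s : Int) + 1)) none ++ PySem.List.slice cs none (some (s : Int))) := by
  have hslice1 : PySem.List.slice cs (some ((s : Int) + 1)) none = cs.drop (s + 1) := by
    rw [show ((s : Int) + 1) = ((s + 1 : Nat) : Int) by push_cast; ring, PySem.List.slice_from_natCast]
  have hslice2 : PySem.List.slice cs none (some (s : Int)) = cs.take s := PySem.List.slice_to_natCast cs s
  rw [hslice1, hslice2]
  simp only [List.append_assoc]
  by_cases hn2 : cs.length ≤ 2
  · -- circles of length 1 or 2: the two candidates are the same list
    have hFR : cs.drop (s + 1) ++ cs.take s = (cs.take s).reverse ++ (cs.drop (s + 1)).reverse := by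
      rcases cs with _ | ⟨a, t⟩
      · simp at hs
      · rcases t with _ | ⟨b, u⟩
        · have hs' : s = 0 := by simp at hs; omega
          subst hs'; simp
        · have hu : u = [] := by simp at hn2; omega
          subst hu
          have hs' : s < 2 := by simpa using hs
          interval_cases s <;> simp
    rw [hFR]
    simp
  · have hn3 : 3 ≤ cs.length := by omega
    have hpos : 0 < cs.length := by omega
    have hnenil : cs ≠ [] := List.ne_nil_of_length_pos hpos
    have hi1lt : (s + 1) % cs.length < cs.length := Nat.mod_lt _ hpos
    have hi0lt : (if s = 0 then cs.length - 1 else s - 1) < cs.length := by split <;> omega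
    have hi1 : (s + 1) % cs.length = if s + 1 = cs.length then 0 else s + 1 := by
      by_cases h : s + 1 = cs.length
      · simp [h, Nat.mod_self]
      · rw [Nat.mod_eq_of_lt (by omega)]; simp [h]
    have hnb1 : PySem.List.pyGetD cs (PySem.Int.mod ((s : Int) + 1) (cs.length : Int)) ' '
        = cs[(s + 1) % cs.length]'hi1lt := by
      rw [show ((s : Int) + 1) = ((s + 1 : Nat) : Int) by push_cast; ring, PySem.Int.mod_natCast,
          PySem.List.pyGetD_natCast, List.getD_eq_getElem _ _ hi1lt]
    have hnb0 : PySem.List.pyGetD cs ((s : Int) - 1) ' '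
        = cs[if s = 0 then cs.length - 1 else s - 1]'hi0lt := by
      by_cases hs0 : s = 0
      · subst hs0
        rw [show ((0 : Nat) : Int) - 1 = -1 by norm_num, PySem.List.pyGetD_neg_one cs ' ' hnenil,
            List.getLast_eq_getElem hnenil]
        simp
      · have h1s : 1 ≤ s := Nat.pos_of_ne_zero hs0
        rw [show ((s : Int) - 1) = ((s - 1 : Nat) : Int) by omega, PySem.List.pyGetD_natCast,
            List.getD_eq_getElem _ _ (by omega)]
        simp [hs0]
    have hFlen : 0 < (cs.drop (s + 1) ++ cs.take s).length := by
      simp only [List.length_append, List.length_drop, List.length_take]; omega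
    obtain ⟨fh, ft, hF⟩ := List.exists_cons_of_ne_nil (List.ne_nil_of_length_pos hFlen)
    have hF0 : fh = cs[(s + 1) % cs.length]'hi1lt := by
      have hfh : (cs.drop (s + 1) ++ cs.take s)[0]'hFlen = fh := by
        simp only [hF]; rfl
      rw [← hfh]
      by_cases h : s + 1 < cs.length
      · have hmod : (s + 1) % cs.length = s + 1 := Nat.mod_eq_of_lt h
        simp only [hmod]
        rw [List.getElem_append_left (by simp only [List.length_drop]; omega), List.getElem_drop]
      · have hmod : (s + 1) % cs.length = 0 := by
          have he : s + 1 = cs.length := by omega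
          simp [he]
        have hd : cs.drop (s + 1) = [] := List.drop_eq_nil_of_le (by omega)
        simp only [hmod]
        simp only [hd, List.nil_append, List.getElem_take]
    have hRlen : 0 < ((cs.take s).reverse ++ (cs.drop (s + 1)).reverse).length := by
      simp only [List.length_append, List.length_reverse, List.length_drop, List.length_take]; omega
    obtain ⟨rh, rt, hR⟩ := List.exists_cons_of_ne_nil (List.ne_nil_of_length_pos hRlen)
    have hR0 : rh = cs[if s = 0 then cs.length - 1 else s - 1]'hi0lt := by
      have hrh : ((cs.take s).reverse ++ (cs.drop (s + 1)).reverse)[0]'hRlen = rh := by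
        simp only [hR]; rfl
      rw [← hrh]
      by_cases hs0 : s = 0
      · subst hs0
        simp only [List.take_zero, List.reverse_nil, List.nil_append]
        rw [List.getElem_reverse, List.getElem_drop]
        congr 1
        simp
        omega
      · have h1s : 1 ≤ s := Nat.pos_of_ne_zero hs0
        simp only [if_neg hs0]
        rw [List.getElem_append_left (by simp only [List.length_reverse, List.length_take]; omega),
            List.getElem_reverse, List.getElem_take]
        congr 1
        simp only [List.length_take]
        omega
    have hidx : (if s = 0 then cs.length - 1 else s - 1) ≠ (s + 1) % cs.length := by
      rw [hi1]; split_ifs <;> omega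
    have hnechar : cs[if s = 0 then cs.length - 1 else s - 1]'hi0lt ≠ cs[(s + 1) % cs.length]'hi1lt := by
      intro he
      have := List.nodup_iff_injective_getElem.mp hnd
        (a₁ := ⟨_, hi0lt⟩) (a₂ := ⟨_, hi1lt⟩) he
      exact hidx (by simpa using congrArg Fin.val this)
    have hmem0 : cs[if s = 0 then cs.length - 1 else s - 1]'hi0lt ∈ pvDigitChars :=
      hdig _ (List.getElem_mem hi0lt)
    have hmem1 : cs[(s + 1) % cs.length]'hi1lt ∈ pvDigitChars :=
      hdig _ (List.getElem_mem hi1lt)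
    rw [hnb0, hnb1, hF, hR, ← hF0, ← hR0]
    by_cases hcond : pvCharInt (cs[if s = 0 then cs.length - 1 else s - 1]'hi0lt)
        > pvCharInt (cs[(s + 1) % cs.length]'hi1lt)
    · have hlt : fh < rh := by
        rw [hF0, hR0]
        exact (pv_digit_gt_iff _ hmem0 _ hmem1).mp hcond
      rw [if_pos (by rw [hF0, hR0]; exact hcond),
          if_neg (List.lt_asymm (pv_lex_append_cons hlt (P := mchars)))]
    · have hlt : rh < fh := by
        rw [hF0, hR0]
        rcases lt_trichotomy (cs[if s = 0 then cs.length - 1 else s - 1]'hi0lt)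
          (cs[(s + 1) % cs.length]'hi1lt) with h | h | h
        · exact h
        · exact absurd h hnechar
        · exact absurd ((pv_digit_gt_iff _ hmem0 _ hmem1).mpr h) hcond
      rw [if_neg (by rw [hF0, hR0]; exact hcond),
          if_pos (pv_lex_append_cons hlt (P := mchars))]

theorem pv_getD_pair_zero (a b : Char) : PySem.List.pyGetD [a, b] 0 ' ' = a := by simp [pysem]
theorem pv_getD_pair_one (a b : Char) : PySem.List.pyGetD [a, b] 1 ' ' = b := by simp [pysem]

-- helper: both candidate heads are equal, so the smaller candidate starts with that head
theorem pv_M_head (c : Int) (x y : List Int) :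
    ∃ t, (if (c :: x) < (c :: y) then (c :: x) else (c :: y)) = c :: t := by
  split_ifs <;> exact ⟨_, rfl⟩

-- a strictly smaller head decides the lexicographic order
theorem pv_lex_cons {α : Type} [LT α] {f r : List α} {c1 c2 : α} (h : c1 < c2) :
    c1 :: f < c2 :: r :=
  (List.lt_iff_lex_lt _ _).mpr (List.Lex.rel h)

-- pvCharInt is injective and strictly monotone on digit characters; str undoes it
theorem pv_charInt_inj : ∀ a ∈ pvDigitChars, ∀ b ∈ pvDigitChars,
    pvCharInt a = pvCharInt b → a = b := by
  intro a ha b hb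
  fin_cases ha <;> fin_cases hb <;> decide

theorem pv_digit_lt_iff : ∀ a ∈ pvDigitChars, ∀ b ∈ pvDigitChars,
    (pvCharInt a < pvCharInt b ↔ a < b) := by
  intro a ha b hb
  fin_cases ha <;> fin_cases hb <;> decide

theorem pv_toChars_charInt : ∀ a ∈ pvDigitChars, PySem.Int.toChars (pvCharInt a) = [a] := by
  intro a ha
  fin_cases ha <;> decide

-- mapping int() over digit characters preserves the lexicographic order
theorem pv_map_lt : ∀ (x y : List Char), (∀ a ∈ x, a ∈ pvDigitChars) → (∀ a ∈ y, a ∈ pvDigitChars) →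
    (x.map pvCharInt < y.map pvCharInt ↔ x < y) := by
  intro x
  induction x with
  | nil =>
    intro y _ _
    cases y with
    | nil => simp
    | cons b u => simp [List.nil_lt_cons]
  | cons a t ih =>
    intro y hx hy
    cases y with
    | nil => simp [List.not_lt_nil]
    | cons b u =>
      have ha := hx a List.mem_cons_self
      have hb := hy b List.mem_cons_self
      have ht : ∀ z ∈ t, z ∈ pvDigitChars := fun z hz => hx z (List.mem_cons_of_mem _ hz)
      have hu : ∀ z ∈ u, z ∈ pvDigitChars := fun z hz => hy z (List.mem_cons_of_mem _ hz)
      simp only [List.map_cons, List.cons_lt_cons_iff]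
      constructor
      · rintro (h | ⟨he, h⟩)
        · exact Or.inl ((pv_digit_lt_iff a ha b hb).mp h)
        · exact Or.inr ⟨pv_charInt_inj a ha b hb he, (ih u ht hu).mp h⟩
      · rintro (h | ⟨he, h⟩)
        · exact Or.inl ((pv_digit_lt_iff a ha b hb).mpr h)
        · exact Or.inr ⟨by rw [he], (ih u ht hu).mpr h⟩

-- str(d) joined over a digit-char list reproduces the list
theorem pv_join_digits : ∀ (l : List Char), (∀ a ∈ l, a ∈ pvDigitChars) →
    (((l.map pvCharInt).map (fun d => PySem.Int.toChars d)).flatten) = l := by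
  intro l
  induction l with
  | nil => intro _; simp
  | cons a t ih =>
    intro h
    simp only [List.map_cons, List.flatten_cons,
               pv_toChars_charInt a (h a List.mem_cons_self),
               ih (fun z hz => h z (List.mem_cons_of_mem _ hz))]
    rfl

-- the two order instances on List Int decide the same relation, so min? agrees
theorem pv_min?_inst (L : List (List Int)) :
    (@PySem.List.min? (List Int) (List Int) List.instLT (fun a b => a.decidableLT b) L fun x => x)
  = (@PySem.List.min? (List Int) (List Int) List.instLinearOrder.toLT LinearOrder.toDecidableLT L fun x => x) := by
  have h : (fun (a b : List Int) => a.decidableLT b)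
      = (@LinearOrder.toDecidableLT _ List.instLinearOrder) := by
    funext a b; exact Subsingleton.elim _ _
  exact congrArg (fun d => @PySem.List.min? (List Int) (List Int) List.instLT d L (fun x => x)) h

-- the minimum over all rotations of ds and of ds.reverse is the smaller of the two
-- rotations that start at the unique minimal entry ds[j]
theorem pv_min_candidates (ds : List Int) (j : Nat) (hj : j < ds.length) (hnd : ds.Nodup)
    (hdmin : ∀ x ∈ ds, ds[j] ≤ x) :
    PySem.List.min?
      ((PySem.List.pyRange 0 (ds.length : Int) 1).map
          (fun i => PySem.List.slice (ds ++ ds) (some i) (some (i + (ds.length : Int))))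
        ++ (PySem.List.pyRange 0 (ds.length : Int) 1).map
          (fun i => PySem.List.slice (ds.reverse ++ ds.reverse) (some i) (some (i + (ds.length : Int)))))
      (fun x => x)
    = some (if (ds[j] :: ((ds.take j).reverse ++ (ds.drop (j+1)).reverse))
              < (ds[j] :: (ds.drop (j+1) ++ ds.take j))
            then ds[j] :: ((ds.take j).reverse ++ (ds.drop (j+1)).reverse)
            else ds[j] :: (ds.drop (j+1) ++ ds.take j)) := by
  set n := ds.length with hn
  set c : Int := ds[j] with hc
  set F : List Int := c :: (ds.drop (j+1) ++ ds.take j) with hF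
  set B : List Int := c :: ((ds.take j).reverse ++ (ds.drop (j+1)).reverse) with hB
  set M : List Int := if B < F then B else F with hM
  set L : List (List Int) :=
      (PySem.List.pyRange 0 (n : Int) 1).map
          (fun i => PySem.List.slice (ds ++ ds) (some i) (some (i + (n : Int))))
        ++ (PySem.List.pyRange 0 (n : Int) 1).map
          (fun i => PySem.List.slice (ds.reverse ++ ds.reverse) (some i) (some (i + (n : Int)))) with hL
  have hMF : M ≤ F := by
    rw [hM]; split_ifs with h
    · exact le_of_lt h
    · exact le_refl F
  have hMB : M ≤ B := by
    rw [hM]; split_ifs with h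
    · exact le_refl B
    · exact not_lt.mp h
  have hMc : ∃ t, M = c :: t := by rw [hM, hB, hF]; exact pv_M_head c _ _
  -- the rotation of ds at j is F
  have hrotF : ds.drop j ++ ds.take j = F := by
    rw [List.drop_eq_getElem_cons hj, hF, List.cons_append]
  -- the rotation of ds.reverse at n-1-j is B
  have hrevd : ds.reverse.drop (n - 1 - j) = c :: (ds.take j).reverse := by
    rw [List.drop_reverse, show n - (n - 1 - j) = j + 1 by omega, List.take_add_one]
    simp [List.getElem?_eq_getElem hj, hc]
  have hrevt : ds.reverse.take (n - 1 - j) = (ds.drop (j+1)).reverse := by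
    rw [List.reverse_drop, show n - (j + 1) = n - 1 - j by omega]
  have hrotB : ds.reverse.drop (n - 1 - j) ++ ds.reverse.take (n - 1 - j) = B := by
    rw [hrevd, hrevt, hB, List.cons_append]
  -- the minimal entry sits at a unique position
  have huniq : ∀ (k : Nat) (hk : k < n), ds[k] = c → k = j := by
    intro k hk he
    have := List.nodup_iff_injective_getElem.mp hnd
      (a₁ := ⟨k, hk⟩) (a₂ := ⟨j, hj⟩) (show ds[k] = ds[j] by rw [he, hc])
    simpa using congrArg Fin.val this
  -- any other entry is strictly larger
  have hlarger : ∀ (d : Int), d ∈ ds → d ≠ c → c < d := fun d hd hne =>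
    lt_of_le_of_ne (hdmin d hd) (Ne.symm hne)
  -- M is a lower bound of every candidate
  have hbound : ∀ r ∈ L, M ≤ r := by
    intro r hr
    rw [hL] at hr
    rcases List.mem_append.mp hr with hr | hr <;>
      obtain ⟨i, hi, rfl⟩ := List.mem_map.mp hr <;>
      obtain ⟨hi0, hin⟩ := PySem.List.mem_pyRange_one.mp hi <;>
      obtain ⟨k, rfl⟩ := Int.eq_ofNat_of_zero_le hi0 <;>
      have hk : k < n := by exact_mod_cast hin
    · -- rotations of ds
      rw [pv_rotation ds k (le_of_lt hk)]
      by_cases hkj : k = j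
      · subst hkj; rw [hrotF]; exact hMF
      · have hhead : c < ds[k] := by
          refine hlarger _ (List.getElem_mem hk) (fun he => hkj (huniq k hk he))
        rw [List.drop_eq_getElem_cons hk, List.cons_append]
        obtain ⟨t, ht⟩ := hMc
        rw [ht]
        exact le_of_lt (pv_lex_cons hhead)
    · -- rotations of ds.reverse
      have hkr : k < ds.reverse.length := by simpa using hk
      rw [show (n : Int) = (ds.reverse.length : Int) by simp [hn],
          pv_rotation ds.reverse k (le_of_lt hkr)]
      by_cases hkj : k = n - 1 - j
      · subst hkj; rw [hrotB]; exact hMB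
      · have hlt' : n - 1 - k < n := by omega
        have hgr : ds.reverse[k] = ds[n - 1 - k]'hlt' := by
          rw [List.getElem_reverse]
        have hhead : c < ds.reverse[k] := by
          rw [hgr]
          refine hlarger _ (List.getElem_mem hlt') (fun he => ?_)
          have := huniq _ hlt' he
          omega
        rw [List.drop_eq_getElem_cons hkr, List.cons_append]
        obtain ⟨t, ht⟩ := hMc
        rw [ht]
        exact le_of_lt (pv_lex_cons hhead)
  -- F and B are candidates
  have hjmem : ((j : Nat) : Int) ∈ PySem.List.pyRange 0 (n : Int) 1 :=
    PySem.List.mem_pyRange_one.mpr ⟨by positivity, by exact_mod_cast hj⟩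
  have hFL : F ∈ L := by
    rw [hL]
    refine List.mem_append_left _ (List.mem_map.mpr ⟨((j : Nat) : Int), hjmem, ?_⟩)
    rw [pv_rotation ds j (le_of_lt hj), hrotF]
  have hj2 : n - 1 - j < n := by omega
  have hj2mem : ((n - 1 - j : Nat) : Int) ∈ PySem.List.pyRange 0 (n : Int) 1 :=
    PySem.List.mem_pyRange_one.mpr ⟨by positivity, by exact_mod_cast hj2⟩
  have hBL : B ∈ L := by
    rw [hL]
    refine List.mem_append_right _ (List.mem_map.mpr ⟨((n - 1 - j : Nat) : Int), hj2mem, ?_⟩)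
    rw [show (n : Int) = (ds.reverse.length : Int) by simp [hn],
        pv_rotation ds.reverse (n - 1 - j) (by simp [hn]; omega), hrotB]
  have hML : M ∈ L := by
    rw [hM]; split_ifs
    · exact hBL
    · exact hFL
  rcases hmin : PySem.List.min? L (fun x => x) with _ | v
  · rw [(PySem.List.min?_eq_none_iff _ _).mp hmin] at hML
    simp at hML
  · have hmin' : (@PySem.List.min? (List Int) (List Int) List.instLinearOrder.toLT
        LinearOrder.toDecidableLT L fun x => x) = some v := (pv_min?_inst L).symm.trans hmin
    have hvM : v ≤ M := PySem.List.min?_id_le hmin' M hML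
    have hMv : M ≤ v := hbound v (PySem.List.min?_mem hmin)
    rw [le_antisymm hvM hMv]

-- ===== VERDICT (by name: the statement is the Claim_ definition above) =====
theorem reorder_circle_spec : Claim_equal_reorder_circle := by
  intro circle _ hpre
  obtain ⟨hne, hset, hall⟩ := hpre
  have hnd : circle.toList.Nodup := by rw [← hset]; exact PySem.Set.nodup_ofList _
  have hdig : ∀ c ∈ circle.toList, c ∈ pvDigitChars := fun c hc => by
    simpa using List.all_eq_true.mp hall c hc
  unfold Spec_reorder_circle
  obtain ⟨c, hc, hm, hcmin⟩ := pv_min_toChars hne hdig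
  obtain ⟨j, hj, hjc, hfind⟩ := pv_find_mem hc
  have hslice1 : PySem.List.slice circle.toList (some ((j : Int) + 1)) none = circle.toList.drop (j + 1) := by
    rw [show ((j : Int) + 1) = ((j + 1 : Nat) : Int) by push_cast; ring, PySem.List.slice_from_natCast]
  have hslice2 : PySem.List.slice circle.toList none (some (j : Int)) = circle.toList.take j :=
    PySem.List.slice_to_natCast circle.toList j
  set Fc : List Char := c :: (circle.toList.drop (j+1) ++ circle.toList.take j) with hFc
  set Bc : List Char := c :: ((circle.toList.take j).reverse ++ (circle.toList.drop (j+1)).reverse) with hBc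
  -- A's side: the branch is the smaller of the two candidates
  have hA : reorder_circle circle = String.ofList (if Bc < Fc then Bc else Fc) := by
    rw [hFc, hBc]
    simp only [reorder_circle, PySem.Str.len_eq, hm, hfind,
               pv_getD_pair_zero, pv_getD_pair_one]
    rw [← apply_ite String.ofList]
    rw [pv_core circle.toList [c] j hj hnd hdig]
    rw [hslice1, hslice2]
    simp only [List.cons_append, List.nil_append]
  -- the digit values of the input
  set ds : List Int := circle.toList.map (fun ch => pvCharInt ch) with hds
  have hjd : j < ds.length := by simpa [hds] using hj
  have hdsj : ds[j] = pvCharInt c := by simp [hds, hjc]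
  have hdsnd : ds.Nodup := hnd.map_on
    (fun x hx y hy he => pv_charInt_inj x (hdig x hx) y (hdig y hy) he)
  have hdsmin : ∀ x ∈ ds, ds[j] ≤ x := by
    intro x hx
    rw [hds] at hx
    obtain ⟨d, hd, rfl⟩ := List.mem_map.mp hx
    rw [hdsj]
    exact hcmin d hd
  -- the two digit-valued candidates are the images of the char candidates
  have hFi : ds.drop (j+1) ++ ds.take j = (circle.toList.drop (j+1) ++ circle.toList.take j).map pvCharInt := by
    simp [hds]
  have hBi : (ds.take j).reverse ++ (ds.drop (j+1)).reverse
      = ((circle.toList.take j).reverse ++ (circle.toList.drop (j+1)).reverse).map pvCharInt := by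
    simp [hds]
  have hFcd : ∀ a ∈ Fc, a ∈ pvDigitChars := by
    intro a ha
    rw [hFc] at ha
    rcases List.mem_cons.mp ha with h | h
    · exact h ▸ hdig c hc
    · rcases List.mem_append.mp h with h | h
      · exact hdig a (List.mem_of_mem_drop h)
      · exact hdig a (List.mem_of_mem_take h)
  have hBcd : ∀ a ∈ Bc, a ∈ pvDigitChars := by
    intro a ha
    rw [hBc] at ha
    rcases List.mem_cons.mp ha with h | h
    · exact h ▸ hdig c hc
    · rcases List.mem_append.mp h with h | h
      · exact hdig a (List.mem_of_mem_take (List.mem_reverse.mp h))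
      · exact hdig a (List.mem_of_mem_drop (List.mem_reverse.mp h))
  -- B's side: the minimum rotation, written back as a string, is the same candidate
  have hB : reorder_circle_alt circle = String.ofList (if Bc < Fc then Bc else Fc) := by
    simp only [reorder_circle_alt, PySem.Str.len_eq, ← hds]
    rw [show ((circle.toList.length : Nat) : Int) = ((ds.length : Nat) : Int) by simp [hds]]
    rw [pv_min_candidates ds j hjd hdsnd hdsmin, Option.getD_some]
    rw [hdsj, hFi, hBi, ← List.map_cons, ← List.map_cons, ← hFc, ← hBc]
    by_cases hcond : Bc < Fc
    · rw [if_pos ((pv_map_lt Bc Fc hBcd hFcd).mpr hcond), if_pos hcond,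
          pv_join_digits Bc hBcd]
    · rw [if_neg (fun h => hcond ((pv_map_lt Bc Fc hBcd hFcd).mp h)), if_neg hcond,
          pv_join_digits Fc hFcd]
  rw [hA, hB]
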